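-- pv_equiv track=rewrite | github.com/sarthakchauhan0/Sudoku-Solver | utils.py | generate_sudoku_string
-- ===== SOURCE A (Python) =====
-- def generate_sudoku_string(assignment, CSP):
--     """
--     Generates a string representation of the sudoku grid based on the current assignment.
--     """
--     grid = ""
--
--     for cell in range(81):
--         grid += str(assignment.get(cell, [0])[0])
--
--         if (cell + 1) % 9 == 0:
--             if cell != 0 and cell != 80:
--                 grid += "\n"
--         else:
--             grid += " "
--
--     return grid
-- ===== SOURCE B (Python) =====
-- def generate_sudoku_string(assignment, CSP):
--     """
--     Generates a string representation of the sudoku grid based on the current assignment.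
--     Built row by row: nine cell strings joined by " ", the nine rows joined by "\n".
--     """
--     rows = []
--     for r in range(9):
--         rows.append(" ".join(str(assignment.get(9 * r + c, [0])[0]) for c in range(9)))
--     return "\n".join(rows)
-- ===== Notes on version B (the rewrite author's own statement) =====
-- stated objective: simpler
-- what changed: Replaces the single flat loop over 81 cells with inline (cell+1)%9 separator branching and edge guards by a two-dimensional decomposition: build each of the 9 rows as a ' '.join of its 9 cell strings and '\n'.join the rows, so no separator conditionals remain.
import Mathlib
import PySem

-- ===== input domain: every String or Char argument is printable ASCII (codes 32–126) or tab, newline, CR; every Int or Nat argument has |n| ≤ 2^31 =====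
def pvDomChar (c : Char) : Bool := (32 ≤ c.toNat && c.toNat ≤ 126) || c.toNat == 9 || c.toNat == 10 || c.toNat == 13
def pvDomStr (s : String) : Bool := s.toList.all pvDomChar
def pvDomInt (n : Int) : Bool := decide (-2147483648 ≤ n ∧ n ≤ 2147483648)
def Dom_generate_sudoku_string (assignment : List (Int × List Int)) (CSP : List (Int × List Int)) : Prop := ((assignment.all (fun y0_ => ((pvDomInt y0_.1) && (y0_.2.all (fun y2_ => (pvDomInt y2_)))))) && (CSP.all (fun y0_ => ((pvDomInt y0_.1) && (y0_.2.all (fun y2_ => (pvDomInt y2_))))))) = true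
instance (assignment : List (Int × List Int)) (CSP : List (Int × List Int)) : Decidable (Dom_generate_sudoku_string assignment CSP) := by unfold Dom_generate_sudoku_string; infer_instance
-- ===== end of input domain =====

-- B builds the grid two-dimensionally (the nine cells of a row joined by " ", the nine rows
-- joined by "\n") instead of A's flat 81-cell loop with per-cell separator branching; objective: simpler.

-- ===== PORT A =====
-- str(assignment.get(cell, [0])[0]); the final `.getD 0` is the total form of v[0] —
-- Pre_ below excludes the empty-value-list inputs on which Python raises IndexError.
def pvCellStr (assignment : List (Int × List Int)) (cell : Int) : String :=
  PySem.Int.toStr ((PySem.List.pyGet? (PySem.Dict.getD (PySem.Dict.ofList assignment) cell [0]) 0).getD 0)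

-- the body of A's `for cell in range(81)` loop
def pvStep (assignment : List (Int × List Int)) (grid : String) (cell : Int) : String :=
  let grid := grid ++ pvCellStr assignment cell
  if PySem.Int.mod (cell + 1) 9 = 0 then
    if cell ≠ 0 ∧ cell ≠ 80 then grid ++ "\n" else grid
  else grid ++ " "

def generate_sudoku_string (assignment : List (Int × List Int)) (CSP : List (Int × List Int)) : String :=
  (PySem.List.pyRange 0 81 1).foldl (pvStep assignment) ""

-- ===== PORT B =====
def generate_sudoku_string_alt (assignment : List (Int × List Int)) (CSP : List (Int × List Int)) : String :=
  PySem.Str.join "\n"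
    ((PySem.List.pyRange 0 9 1).map (fun r =>
      PySem.Str.join " "
        ((PySem.List.pyRange 0 9 1).map (fun c =>
          PySem.Int.toStr ((PySem.List.pyGet? (PySem.Dict.getD (PySem.Dict.ofList assignment) (9 * r + c) [0]) 0).getD 0)))))

-- ===== PRECONDITION & SPEC =====
-- Pre_ excludes exactly the inputs where some cell 0..80 maps to an EMPTY list, on which
-- Python's `assignment.get(cell, [0])[0]` raises IndexError (in A and in B alike).
def Pre_generate_sudoku_string (assignment : List (Int × List Int)) (CSP : List (Int × List Int)) : Prop :=
  ((List.range 81).all (fun c => PySem.Dict.getD (PySem.Dict.ofList assignment) (c : Int) [0] ≠ [])) = true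
instance (assignment : List (Int × List Int)) (CSP : List (Int × List Int)) : Decidable (Pre_generate_sudoku_string assignment CSP) := by unfold Pre_generate_sudoku_string; infer_instance

def pvWitness_generate_sudoku_string : (List (Int × List Int)) × (List (Int × List Int)) :=
  ([(0, [5]), (40, [9])], [])

def Spec_generate_sudoku_string (assignment : List (Int × List Int)) (CSP : List (Int × List Int)) (out : String) : Prop := out = generate_sudoku_string_alt assignment CSP
instance (assignment : List (Int × List Int)) (CSP : List (Int × List Int)) (out : String) : Decidable (Spec_generate_sudoku_string assignment CSP out) := by unfold Spec_generate_sudoku_string; infer_instance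

-- ===== CLAIM (what is proved, stated in full; the proofs are below) =====
def Claim_equal_generate_sudoku_string : Prop := ∀ (assignment : List (Int × List Int)) (CSP : List (Int × List Int)), Dom_generate_sudoku_string assignment CSP → Pre_generate_sudoku_string assignment CSP → Spec_generate_sudoku_string assignment CSP (generate_sudoku_string assignment CSP)

-- ===== LEMMAS AND PROOFS =====

theorem pvMod9 (x : Int) : PySem.Int.mod x 9 = x % 9 := by
  show x.fmod 9 = x % 9
  rw [Int.fmod_eq_emod]; norm_num

theorem pvStep_mid (assignment : List (Int × List Int)) (grid : String) (cell : Int)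
    (h : (cell + 1) % 9 ≠ 0) : pvStep assignment grid cell = grid ++ pvCellStr assignment cell ++ " " := by
  simp only [pvStep, pvMod9]; rw [if_neg h]

theorem pvStep_end (assignment : List (Int × List Int)) (grid : String) (cell : Int)
    (h : (cell + 1) % 9 = 0) (h0 : cell ≠ 0) (h80 : cell ≠ 80) :
    pvStep assignment grid cell = grid ++ pvCellStr assignment cell ++ "\n" := by
  simp only [pvStep, pvMod9]; rw [if_pos h, if_pos ⟨h0, h80⟩]

theorem pvStep_last (assignment : List (Int × List Int)) (grid : String) :
    pvStep assignment grid 80 = grid ++ pvCellStr assignment 80 := by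
  simp only [pvStep, pvMod9]; norm_num

theorem pvJoin_cons (sep p q : String) (rest : List String) :
    PySem.Str.join sep (p :: q :: rest) = p ++ sep ++ PySem.Str.join sep (q :: rest) := by
  simp [PySem.Str.join, PySem.Chars.join_cons_cons, String.append_assoc]

theorem pvJoin_one (sep p : String) : PySem.Str.join sep [p] = p := by
  simp [PySem.Str.join, PySem.Chars.join, List.intercalate]

theorem pvRow_lemma (assignment : List (Int × List Int)) (a b : Int) (hb : b = a + 9)
    (h9 : a % 9 = 0) (h0 : 0 ≤ a) (hlt : a < 72) (grid : String) :
    (PySem.List.pyRange a b 1).foldl (pvStep assignment) grid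
      = grid ++ PySem.Str.join " " ((PySem.List.pyRange 0 9 1).map (fun c => pvCellStr assignment (a + c)))
          ++ "\n" := by
  subst hb
  rw [PySem.List.pyRange_one_cons (by omega), PySem.List.pyRange_one_cons (by omega),
      PySem.List.pyRange_one_cons (by omega), PySem.List.pyRange_one_cons (by omega),
      PySem.List.pyRange_one_cons (by omega), PySem.List.pyRange_one_cons (by omega),
      PySem.List.pyRange_one_cons (by omega), PySem.List.pyRange_one_cons (by omega),
      PySem.List.pyRange_one_cons (by omega), PySem.List.pyRange_one_eq_nil (by omega)]
  simp only [List.foldl]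
  rw [pvStep_end _ _ _ (by omega) (by omega) (by omega)]
  rw [pvStep_mid _ _ _ (by omega), pvStep_mid _ _ _ (by omega), pvStep_mid _ _ _ (by omega),
      pvStep_mid _ _ _ (by omega), pvStep_mid _ _ _ (by omega), pvStep_mid _ _ _ (by omega),
      pvStep_mid _ _ _ (by omega), pvStep_mid _ _ _ (by omega)]
  rw [show PySem.List.pyRange 0 9 1 = [0,1,2,3,4,5,6,7,8] from by decide]
  simp only [List.map]
  simp only [pvJoin_cons, pvJoin_one]
  ring_nf
  simp [String.append_assoc]

theorem pvRow_last (assignment : List (Int × List Int)) (grid : String) :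
    (PySem.List.pyRange 72 81 1).foldl (pvStep assignment) grid
      = grid ++ PySem.Str.join " " ((PySem.List.pyRange 0 9 1).map (fun c => pvCellStr assignment (72 + c))) := by
  rw [show PySem.List.pyRange 72 81 1 = [72,73,74,75,76,77,78,79,80] from by decide]
  simp only [List.foldl]
  rw [pvStep_last]
  rw [pvStep_mid _ _ _ (by omega), pvStep_mid _ _ _ (by omega), pvStep_mid _ _ _ (by omega),
      pvStep_mid _ _ _ (by omega), pvStep_mid _ _ _ (by omega), pvStep_mid _ _ _ (by omega),
      pvStep_mid _ _ _ (by omega), pvStep_mid _ _ _ (by omega)]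
  rw [show PySem.List.pyRange 0 9 1 = [0,1,2,3,4,5,6,7,8] from by decide]
  simp only [List.map]
  simp only [pvJoin_cons, pvJoin_one]
  norm_num [String.append_assoc]

-- ===== VERDICT (by name: the statement is the Claim_ definition above) =====
theorem generate_sudoku_string_spec : Claim_equal_generate_sudoku_string := by
  intro assignment CSP _ _
  unfold Spec_generate_sudoku_string generate_sudoku_string generate_sudoku_string_alt
  rw [show PySem.List.pyRange 0 81 1
        = PySem.List.pyRange 0 9 1 ++ PySem.List.pyRange 9 18 1 ++ PySem.List.pyRange 18 27 1
          ++ PySem.List.pyRange 27 36 1 ++ PySem.List.pyRange 36 45 1 ++ PySem.List.pyRange 45 54 1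
          ++ PySem.List.pyRange 54 63 1 ++ PySem.List.pyRange 63 72 1 ++ PySem.List.pyRange 72 81 1
      from by decide]
  simp only [List.foldl_append]
  rw [pvRow_lemma assignment 0 9 (by norm_num) (by norm_num) (by norm_num) (by norm_num),
      pvRow_lemma assignment 9 18 (by norm_num) (by norm_num) (by norm_num) (by norm_num),
      pvRow_lemma assignment 18 27 (by norm_num) (by norm_num) (by norm_num) (by norm_num),
      pvRow_lemma assignment 27 36 (by norm_num) (by norm_num) (by norm_num) (by norm_num),
      pvRow_lemma assignment 36 45 (by norm_num) (by norm_num) (by norm_num) (by norm_num),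
      pvRow_lemma assignment 45 54 (by norm_num) (by norm_num) (by norm_num) (by norm_num),
      pvRow_lemma assignment 54 63 (by norm_num) (by norm_num) (by norm_num) (by norm_num),
      pvRow_lemma assignment 63 72 (by norm_num) (by norm_num) (by norm_num) (by norm_num),
      pvRow_last assignment]
  rw [show PySem.List.pyRange 0 9 1 = [0,1,2,3,4,5,6,7,8] from by decide]
  simp only [List.map, pvCellStr]
  simp only [pvJoin_cons, pvJoin_one]
  norm_num [String.append_assoc]
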